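-- pv_equiv track=rewrite | github.com/KWONILCHEOL/Python | KAKAO/[kakao][2021][blind]메뉴 리뉴얼.py | solution
-- ===== SOURCE A (Python) =====
-- from itertools import combinations
--
-- def solution(orders, course):
--     answer = []
--     dic = {}
--
--     for s in orders:
--         for n in course:
--             if n <= len(s):
--                 for x in combinations(s, n):
--                     key = ''.join(sorted(x))
--                     if key in dic:
--                         dic[key] += 1
--                     else:
--                         dic[key] = 1
--
--     del_list = []
--     for key in dic.keys():
--         if dic[key] < 2:
--             del_list.append(key)
--
--     for item in del_list:
--         del dic[item]
--
--     cnt = [0] * 11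
--     for key in dic.keys():
--         cnt[len(key)] = max(cnt[len(key)], dic[key])
--
--     for i in range(2, 11):
--         if cnt[i] == 0:
--             continue
--         for key in dic.keys():
--             if i == len(key) and cnt[i] == dic[key]:
--                 answer.append(key)
--
--     answer.sort()
--     return answer
-- ===== SOURCE B (Python) =====
-- from itertools import combinations
--
-- def solution(orders, course):
--     answer = []
--     for i in range(2, 11):
--         c = {}
--         for n in course:
--             if n == i:
--                 for s in orders:
--                     for x in combinations(s, i):
--                         key = ''.join(sorted(x))
--                         c[key] = c.get(key, 0) + 1
--         if c:
--             best = max(c.values())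
--             if best >= 2:
--                 answer.extend(k for k, v in c.items() if v == best)
--     return sorted(answer)
-- ===== Notes on version B (the rewrite author's own statement) =====
-- stated objective: simpler
-- what changed: B replaces A's global dict followed by three trailing passes (delete keys with count<2, fill a cnt[] max table, rescan the whole key dict once per length) with one loop per course length 2..10 that builds a local counter and selects its max-frequency keys inline, sorting once at the end.
-- outside the precondition, e.g. on solution(['abcdefghijk'], [11]): A returns [], B returns []; on solution([], [-1]): A returns [], B returns []
import Mathlib
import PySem

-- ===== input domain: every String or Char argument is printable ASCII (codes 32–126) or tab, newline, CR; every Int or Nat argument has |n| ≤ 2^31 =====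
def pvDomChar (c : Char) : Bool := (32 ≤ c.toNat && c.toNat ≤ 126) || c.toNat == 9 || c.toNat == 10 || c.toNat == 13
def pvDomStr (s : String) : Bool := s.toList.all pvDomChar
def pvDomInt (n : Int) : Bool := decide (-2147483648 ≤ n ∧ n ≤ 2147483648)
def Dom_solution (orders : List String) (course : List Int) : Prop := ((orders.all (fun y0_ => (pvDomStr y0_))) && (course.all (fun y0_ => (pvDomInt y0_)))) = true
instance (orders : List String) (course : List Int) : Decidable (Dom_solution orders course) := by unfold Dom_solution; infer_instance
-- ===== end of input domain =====

-- B differs from A only in decomposition (per-length counters with inline max selection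
-- instead of a global dict plus delete/cnt-table/rescan passes); equivalence is proved on
-- Pre_solution (course entries that cannot make Python's A raise).

-- key = ''.join(sorted(x))  (both Pythons contain this same expression)
def pvKey (x : List Char) : String := String.ofList (PySem.List.sorted x (fun c => c) false)

-- ===== PORT A =====
def solution (orders : List String) (course : List Int) : List String :=
  let dic : PySem.Dict String Int :=
    orders.foldl (fun dic s =>
      course.foldl (fun dic n =>
        if n ≤ PySem.Str.len s then
          (PySem.List.combinations s.toList n.toNat).foldl (fun dic x =>
            let key := pvKey x
            if dic.contains key then dic.modify key 0 (· + 1) else dic.insert key 1) dic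
        else dic) dic) PySem.Dict.empty
  let delList : List String :=
    dic.keys.foldl (fun acc key => if dic.getD key 0 < 2 then acc ++ [key] else acc) []
  let dic2 : PySem.Dict String Int := delList.foldl (fun d item => d.erase item) dic
  let cnt : List Int :=
    dic2.keys.foldl (fun cnt key =>
      PySem.List.pySetD cnt (PySem.Str.len key)
        (max (PySem.List.pyGetD cnt (PySem.Str.len key) 0) (dic2.getD key 0)))
      (List.replicate 11 0)
  let answer : List String :=
    (PySem.List.pyRange 2 11 1).foldl (fun answer i =>
      if PySem.List.pyGetD cnt i 0 = 0 then answer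
      else dic2.keys.foldl (fun answer key =>
        if i = PySem.Str.len key ∧ PySem.List.pyGetD cnt i 0 = dic2.getD key 0
        then answer ++ [key] else answer) answer) []
  PySem.List.sorted answer (fun x => x) false

-- ===== PORT B =====
def solution_alt (orders : List String) (course : List Int) : List String :=
  let answer : List String :=
    (PySem.List.pyRange 2 11 1).foldl (fun answer i =>
      let c : PySem.Dict String Int :=
        course.foldl (fun c n =>
          if n = i then
            orders.foldl (fun c s =>
              (PySem.List.combinations s.toList i.toNat).foldl (fun c x =>
                let key := pvKey x
                c.insert key (c.getD key 0 + 1)) c) c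
          else c) PySem.Dict.empty
      match PySem.List.max? c.values (fun v => v) with
      | none => answer
      | some best =>
          if 2 ≤ best then
            answer ++ (c.items.filter (fun p => p.2 == best)).map (fun p => p.1)
          else answer) []
  PySem.List.sorted answer (fun x => x) false

-- ===== PRECONDITION & SPEC =====
-- Pre_ excludes course entries outside 0..10 unless no order is long enough to reach them:
-- a negative n makes A's combinations(s, n) raise ValueError, and an n ≥ 11 that some order
-- can realise can make A's cnt[len(key)] raise IndexError; on the excluded inputs where A
-- happens to return (all such long combinations distinct), A returns [] from them and so does B.
def Pre_solution (orders : List String) (course : List Int) : Prop :=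
  ∀ n ∈ course, 0 ≤ n ∧ (n ≤ 10 ∨ ∀ s ∈ orders, (PySem.Str.len s) < n)
instance (orders : List String) (course : List Int) : Decidable (Pre_solution orders course) := by
  unfold Pre_solution; infer_instance
def pvWitness_solution : List String × List Int := (["ab", "ab"], [2])

def Spec_solution (orders : List String) (course : List Int) (out : List String) : Prop := out = solution_alt orders course
instance (orders : List String) (course : List Int) (out : List String) : Decidable (Spec_solution orders course out) := by unfold Spec_solution; infer_instance

-- ===== CLAIM (what is proved, stated in full; the proofs are below) =====
def Claim_equal_solution : Prop := ∀ (orders : List String) (course : List Int), Dom_solution orders course → Pre_solution orders course → Spec_solution orders course (solution orders course)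

-- ===== LEMMAS AND PROOFS =====

-- Canonical key sequences: the multiset of keys A inserts, and the one B inserts for length i.
def pvSeqA (orders : List String) (course : List Int) : List String :=
  orders.flatMap (fun s => course.flatMap (fun n =>
    if n ≤ PySem.Str.len s then (PySem.List.combinations s.toList n.toNat).map pvKey else []))

def pvSeqB (orders : List String) (course : List Int) (i : Int) : List String :=
  course.flatMap (fun n => if n = i then
    orders.flatMap (fun s => (PySem.List.combinations s.toList i.toNat).map pvKey) else [])

-- the distinct keys that survive A's `del` pass (count ≥ 2)
def pvKeys2 (o : List String) (c : List Int) : List String :=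
  (PySem.Set.ofList (pvSeqA o c)).filter (fun k => decide (2 ≤ (pvSeqA o c).count k))

-- A's cnt[i]: max surviving count among keys of length i (0 if none)
def pvM (o : List String) (c : List Int) (i : Nat) : Int :=
  ((pvKeys2 o c).filter (fun k => k.toList.length == i)).foldl
    (fun a k => max a ((pvSeqA o c).count k : Int)) 0

-- A's per-length contribution to answer (canonical form)
def pvGA (o : List String) (c : List Int) (i : Int) : List String :=
  if pvM o c i.toNat = 0 then []
  else (pvKeys2 o c).filter
    (fun k => decide (i = (k.toList.length : Int) ∧ pvM o c i.toNat = ((pvSeqA o c).count k : Int)))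

-- B's per-length contribution to answer (canonical form)
def pvGB (o : List String) (c : List Int) (i : Int) : List String :=
  match PySem.List.max? (PySem.Dict.counter (pvSeqB o c i)).values (fun v => v) with
  | none => []
  | some best =>
      if 2 ≤ best then
        ((PySem.Dict.counter (pvSeqB o c i)).items.filter (fun p => p.2 == best)).map (fun p => p.1)
      else []

theorem pvKey_length (x : List Char) : (pvKey x).toList.length = x.length := by
  simp [pvKey, PySem.List.length_sorted]

theorem pv_mem_seqA_length (o : List String) (c : List Int) (hpre : Pre_solution o c)
    (k : String) (hk : k ∈ pvSeqA o c) : k.toList.length ≤ 10 := by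
  simp only [pvSeqA, List.mem_flatMap] at hk
  obtain ⟨s, hs, n, hn, hk⟩ := hk
  by_cases hg : n ≤ PySem.Str.len s
  · rw [if_pos hg] at hk
    simp only [List.mem_map] at hk
    obtain ⟨x, hx, rfl⟩ := hk
    obtain ⟨-, hxlen⟩ := (PySem.List.mem_combinations_iff _ _ _).1 hx
    rcases hpre n hn with ⟨hn0, hn10 | hbig⟩
    · rw [pvKey_length, hxlen]; omega
    · exact absurd hg (by simpa using not_le.2 (hbig s hs))
  · rw [if_neg hg] at hk; cases hk

theorem pv_mem_seqB_length (o : List String) (c : List Int) (i : Int) (k : String)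
    (hk : k ∈ pvSeqB o c i) : k.toList.length = i.toNat := by
  simp only [pvSeqB, List.mem_flatMap] at hk
  obtain ⟨n, hn, hk⟩ := hk
  by_cases hg : n = i
  · rw [if_pos hg] at hk
    simp only [List.mem_flatMap, List.mem_map] at hk
    obtain ⟨s, hs, x, hx, rfl⟩ := hk
    obtain ⟨-, hxlen⟩ := (PySem.List.mem_combinations_iff _ _ _).1 hx
    rw [pvKey_length, hxlen]
  · rw [if_neg hg] at hk; cases hk

theorem pv_sum_comm {α β : Type} (l1 : List α) (l2 : List β) (f : α → β → Nat) :
    (l1.map (fun a => (l2.map (f a)).sum)).sum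
      = (l2.map (fun b => (l1.map (fun a => f a b)).sum)).sum := by
  induction l1 with
  | nil => simp
  | cons x t ih => simp [List.sum_map_add, ih]

theorem pv_count_eq (o : List String) (c : List Int) (hpre : Pre_solution o c)
    (i : Int) (hi2 : 2 ≤ i) (hi10 : i ≤ 10) (k : String) (hk : (k.toList.length : Int) = i) :
    (pvSeqB o c i).count k = (pvSeqA o c).count k := by
  have key_len : ∀ (m : Nat) (s : String) , k ∈ (PySem.List.combinations s.toList m).map pvKey → k.toList.length = m := by
    intro m s hmem
    simp only [List.mem_map] at hmem
    obtain ⟨x, hx, rfl⟩ := hmem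
    rw [pvKey_length, ((PySem.List.mem_combinations_iff _ _ _).1 hx).2]
  rw [pvSeqA, pvSeqB, List.count_flatMap, List.count_flatMap]
  have swap := pv_sum_comm o c (fun s n =>
    List.count k (if n ≤ PySem.Str.len s then (PySem.List.combinations s.toList n.toNat).map pvKey else []))
  simp only [Function.comp_def, List.count_flatMap]
  rw [swap]
  apply congrArg
  apply List.map_congr_left
  intro n hn
  by_cases hni : n = i
  · subst hni
    rw [if_pos rfl, List.count_flatMap]
    simp only [Function.comp_def]
    apply congrArg
    apply List.map_congr_left
    intro s _
    by_cases hg : n ≤ PySem.Str.len s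
    · rw [if_pos hg]
    · rw [if_neg hg]
      rw [PySem.Str.len_eq] at hg
      have : s.toList.length < n.toNat := by omega
      rw [PySem.List.combinations_eq_nil_of_length_lt _ this]
      simp
  · rw [if_neg hni]
    simp only [List.count_nil]
    have : ∀ s ∈ o, List.count k (if n ≤ PySem.Str.len s then (PySem.List.combinations s.toList n.toNat).map pvKey else []) = 0 := by
      intro s hs
      by_cases hg : n ≤ PySem.Str.len s
      · rw [if_pos hg]
        apply List.count_eq_zero.2
        intro hmem
        have hlen := key_len _ _ hmem
        rcases hpre n hn with ⟨hn0, hn10 | hbig⟩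
        · have : n.toNat ≠ i.toNat := by omega
          apply this
          omega
        · exact absurd hg (not_le.2 (hbig s hs))
      · rw [if_neg hg]; rfl
    rw [List.map_congr_left this]
    simp

theorem pv_step_eq (d : PySem.Dict String Int) (k : String) :
    (if d.contains k then d.modify k 0 (· + 1) else d.insert k 1)
      = d.insert k (d.getD k 0 + 1) := by
  by_cases h : d.contains k
  · simp [h, PySem.Dict.modify]
  · have h' : d.contains k = false := by simpa using h
    rw [if_neg (by simp [h']), PySem.Dict.getD_of_not_contains d 0 h']
    norm_num

theorem pv_dicA_eq (o : List String) (c : List Int) :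
    (o.foldl (fun dic s =>
      c.foldl (fun dic n =>
        if n ≤ PySem.Str.len s then
          (PySem.List.combinations s.toList n.toNat).foldl (fun dic x =>
            let key := pvKey x
            if dic.contains key then dic.modify key 0 (· + 1) else dic.insert key 1) dic
        else dic) dic) PySem.Dict.empty)
      = PySem.Dict.counter (pvSeqA o c) := by
  rw [← PySem.Dict.foldl_insert_getD_add_one_eq_counter]
  rw [pvSeqA, List.foldl_flatMap]
  apply PySem.List.foldl_congr_mem
  intro acc s _
  rw [List.foldl_flatMap]
  apply PySem.List.foldl_congr_mem
  intro acc2 n _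
  by_cases hg : n ≤ PySem.Str.len s
  · rw [if_pos hg, if_pos hg, List.foldl_map]
    apply PySem.List.foldl_congr_mem
    intro d x _
    exact pv_step_eq d (pvKey x)
  · rw [if_neg hg, if_neg hg]; rfl

theorem pv_dicB_eq (o : List String) (c : List Int) (i : Int) :
    (c.foldl (fun d n =>
        if n = i then
          o.foldl (fun d s =>
            (PySem.List.combinations s.toList i.toNat).foldl (fun d x =>
              let key := pvKey x
              d.insert key (d.getD key 0 + 1)) d) d
        else d) PySem.Dict.empty)
      = PySem.Dict.counter (pvSeqB o c i) := by
  rw [← PySem.Dict.foldl_insert_getD_add_one_eq_counter]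
  rw [pvSeqB, List.foldl_flatMap]
  apply PySem.List.foldl_congr_mem
  intro acc n _
  by_cases hg : n = i
  · rw [if_pos hg, if_pos hg, List.foldl_flatMap]
    apply PySem.List.foldl_congr_mem
    intro acc2 s _
    rw [List.foldl_map]
  · rw [if_neg hg, if_neg hg]; rfl

theorem pv_eraseFold_items (todel : List String) (d : PySem.Dict String Int) :
    (todel.foldl (fun d k => d.erase k) d).items
      = d.items.filter (fun p => !todel.contains p.1) := by
  induction todel generalizing d with
  | nil => simp
  | cons x t ih =>
    rw [List.foldl_cons, ih]
    show ((d.erase x).items).filter _ = _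
    rw [PySem.Dict.erase]
    simp only [List.filter_filter]
    apply List.filter_congr
    intro p _
    simp only [List.contains_cons, Bool.not_or, Bool.and_comm]

def pvDic2 (o : List String) (c : List Int) : PySem.Dict String Int :=
  (((PySem.Dict.counter (pvSeqA o c)).keys.foldl (fun acc key =>
      if (PySem.Dict.counter (pvSeqA o c)).getD key 0 < 2 then acc ++ [key] else acc) []).foldl
    (fun d item => d.erase item) (PySem.Dict.counter (pvSeqA o c)))

theorem pv_dic2_items (o : List String) (c : List Int) :
    (pvDic2 o c).items = (pvKeys2 o c).map (fun k => (k, ((pvSeqA o c).count k : Int))) := by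
  rw [pvDic2, PySem.List.foldl_append_ite_eq_filter (fun key => (PySem.Dict.counter (pvSeqA o c)).getD key 0 < 2)]
  rw [List.nil_append, pv_eraseFold_items, PySem.Dict.items_counter, PySem.Dict.keys_counter]
  rw [List.filter_map]
  rw [pvKeys2]
  apply congrArg (List.map _)
  apply List.filter_congr
  intro k hk
  rw [Function.comp_apply]
  by_cases h2 : 2 ≤ List.count k (pvSeqA o c)
  · simp [List.mem_filter, PySem.Dict.getD_counter, h2]
    omega
  · simp [List.mem_filter, PySem.Dict.getD_counter, h2, hk]
    omega

theorem pv_nodup_keys2 (o : List String) (c : List Int) : (pvKeys2 o c).Nodup := by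
  exact (PySem.Set.nodup_ofList _).filter _

theorem pv_mem_keys2 (o : List String) (c : List Int) (k : String) :
    k ∈ pvKeys2 o c ↔ k ∈ pvSeqA o c ∧ 2 ≤ (pvSeqA o c).count k := by
  simp [pvKeys2, List.mem_filter, PySem.Set.mem_ofList]

theorem pv_cnt_fold (v : String → Int) :
    ∀ (K : List String) (c0 : List Int), c0.length = 11 →
      (∀ k ∈ K, k.toList.length < 11) → ∀ i : Nat, i < 11 →
      (K.foldl (fun cnt key =>
        PySem.List.pySetD cnt (PySem.Str.len key)
          (max (PySem.List.pyGetD cnt (PySem.Str.len key) 0) (v key))) c0).getD i 0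
        = (K.filter (fun k => k.toList.length == i)).foldl (fun a k => max a (v k)) (c0.getD i 0) := by
  intro K
  induction K with
  | nil => intro c0 _ _ i _; rfl
  | cons x t ih =>
    intro c0 hlen hK i hi
    rw [List.foldl_cons, List.filter_cons]
    have hx : x.toList.length < 11 := hK x List.mem_cons_self
    have hx' : x.length < 11 := by simpa using hx
    have hset : (PySem.List.pySetD c0 (PySem.Str.len x)
        (max (PySem.List.pyGetD c0 (PySem.Str.len x) 0) (v x)))
        = c0.set x.toList.length (max (c0.getD x.toList.length 0) (v x)) := by
      rw [PySem.Str.len_eq]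
      simp
    rw [hset]
    have hlen' : (c0.set x.toList.length (max (c0.getD x.toList.length 0) (v x))).length = 11 := by
      simp [hlen]
    rw [ih _ hlen' (fun k hk => hK k (List.mem_cons_of_mem _ hk)) i hi]
    by_cases hxi : x.toList.length = i
    · rw [if_pos (by simpa using hxi)]
      rw [List.foldl_cons]
      congr 1
      subst hxi
      simp [List.getD_eq_getElem?_getD, hlen, hx']
    · rw [if_neg (by simpa using hxi)]
      congr 1
      simp only [List.getD_eq_getElem?_getD, List.getElem?_set]
      rw [if_neg hxi]

theorem pv_foldl_max_attain {α : Type} (v : α → Int) :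
    ∀ (L : List α) (a : Int), L.foldl (fun acc y => max acc (v y)) a = a ∨
      ∃ y ∈ L, L.foldl (fun acc y => max acc (v y)) a = v y := by
  intro L
  induction L with
  | nil => intro a; left; rfl
  | cons x t ih =>
    intro a
    rcases ih (max a (v x)) with h | ⟨y, hy, hEq⟩
    · rcases max_choice a (v x) with hm | hm
      · left; rw [List.foldl_cons]; exact h.trans hm
      · right; exact ⟨x, List.mem_cons_self, by rw [List.foldl_cons]; exact h.trans hm⟩
    · right; exact ⟨y, List.mem_cons_of_mem _ hy, by simpa [List.foldl_cons] using hEq⟩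

theorem pvM_le (o : List String) (c : List Int) (i : Nat) (k : String)
    (hk : k ∈ pvKeys2 o c) (hlen : k.toList.length = i) :
    ((pvSeqA o c).count k : Int) ≤ pvM o c i := by
  apply (PySem.List.le_foldl_max_int _ _ _).2
  rw [List.mem_filter]
  exact ⟨hk, by simpa using hlen⟩

theorem pvM_attain (o : List String) (c : List Int) (i : Nat) :
    pvM o c i = 0 ∨ ∃ k ∈ pvKeys2 o c, k.toList.length = i ∧ ((pvSeqA o c).count k : Int) = pvM o c i := by
  rcases pv_foldl_max_attain (fun k => ((pvSeqA o c).count k : Int))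
      ((pvKeys2 o c).filter (fun k => k.toList.length == i)) 0 with h | ⟨y, hy, hEq⟩
  · left; exact h
  · right
    rw [List.mem_filter] at hy
    exact ⟨y, hy.1, by simpa using hy.2, hEq.symm⟩

theorem pv_dic2_keys (o : List String) (c : List Int) : (pvDic2 o c).keys = pvKeys2 o c := by
  show (pvDic2 o c).items.map _ = _
  rw [pv_dic2_items, List.map_map]
  simp [Function.comp_def]

theorem pv_dic2_getD (o : List String) (c : List Int) (k : String) (hk : k ∈ pvKeys2 o c) :
    (pvDic2 o c).getD k 0 = ((pvSeqA o c).count k : Int) := by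
  apply PySem.Dict.getD_of_mem_items
  · rw [pv_dic2_items, List.mem_map]
    exact ⟨k, hk, rfl⟩
  · rw [pv_dic2_keys]; exact pv_nodup_keys2 o c

theorem pv_cnt_getD (o : List String) (c : List Int) (hpre : Pre_solution o c) (i : Nat) (hi : i < 11) :
    ((pvDic2 o c).keys.foldl (fun cnt key =>
        PySem.List.pySetD cnt (PySem.Str.len key)
          (max (PySem.List.pyGetD cnt (PySem.Str.len key) 0) ((pvDic2 o c).getD key 0)))
      (List.replicate 11 0)).getD i 0 = pvM o c i := by
  rw [pv_cnt_fold (fun key => (pvDic2 o c).getD key 0) _ _ (by simp) ?hlt i hi]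
  case hlt =>
    intro k hk
    rw [pv_dic2_keys] at hk
    have : k ∈ pvSeqA o c := ((pv_mem_keys2 o c k).1 hk).1
    have := pv_mem_seqA_length o c hpre k this
    omega
  have h0 : ((List.replicate 11 (0:Int)).getD i 0) = 0 := by interval_cases i <;> rfl
  rw [h0, pv_dic2_keys, pvM]
  apply PySem.List.foldl_congr_mem
  intro a k hk
  rw [List.mem_filter] at hk
  rw [pv_dic2_getD o c k hk.1]

theorem pv_solution_eq (o : List String) (c : List Int) (hpre : Pre_solution o c) :
    solution o c
      = PySem.List.sorted ((PySem.List.pyRange 2 11 1).flatMap (pvGA o c)) (fun x => x) false := by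
  unfold solution
  simp only [pv_dicA_eq]
  rw [← pvDic2.eq_def]
  apply congrArg (fun l => PySem.List.sorted l (fun x => x) false)
  have hbody : ∀ (acc : List String), ∀ i ∈ PySem.List.pyRange 2 11 1,
      (if PySem.List.pyGetD ((pvDic2 o c).keys.foldl (fun cnt key =>
            PySem.List.pySetD cnt (PySem.Str.len key)
              (max (PySem.List.pyGetD cnt (PySem.Str.len key) 0) ((pvDic2 o c).getD key 0)))
          (List.replicate 11 0)) i 0 = 0 then acc
       else (pvDic2 o c).keys.foldl (fun answer key =>
          if i = PySem.Str.len key ∧ PySem.List.pyGetD ((pvDic2 o c).keys.foldl (fun cnt key =>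
              PySem.List.pySetD cnt (PySem.Str.len key)
                (max (PySem.List.pyGetD cnt (PySem.Str.len key) 0) ((pvDic2 o c).getD key 0)))
            (List.replicate 11 0)) i 0 = (pvDic2 o c).getD key 0
          then answer ++ [key] else answer) acc)
      = acc ++ pvGA o c i := by
    intro acc i hi
    rw [PySem.List.mem_pyRange_one] at hi
    have h0i : (0:Int) ≤ i := by omega
    have hcnt : PySem.List.pyGetD ((pvDic2 o c).keys.foldl (fun cnt key =>
            PySem.List.pySetD cnt (PySem.Str.len key)
              (max (PySem.List.pyGetD cnt (PySem.Str.len key) 0) ((pvDic2 o c).getD key 0)))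
          (List.replicate 11 0)) i 0 = pvM o c i.toNat := by
      rw [PySem.List.pyGetD_of_nonneg _ _ h0i]
      exact pv_cnt_getD o c hpre i.toNat (by omega)
    rw [hcnt]
    by_cases hz : pvM o c i.toNat = 0
    · rw [if_pos hz, pvGA, if_pos hz, List.append_nil]
    · rw [if_neg hz, pv_dic2_keys,
        PySem.List.foldl_append_ite_eq_filter
          (fun k => i = PySem.Str.len k ∧ pvM o c i.toNat = (pvDic2 o c).getD k 0),
        pvGA, if_neg hz]
      apply congrArg (acc ++ ·)
      apply List.filter_congr
      intro k hk
      simp [PySem.Str.len_eq, pv_dic2_getD o c k hk]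
  rw [PySem.List.foldl_congr_mem _ _ _ _ hbody, PySem.List.foldl_append_eq_flatMap, List.nil_append]

theorem pv_solution_alt_eq (o : List String) (c : List Int) :
    solution_alt o c
      = PySem.List.sorted ((PySem.List.pyRange 2 11 1).flatMap (pvGB o c)) (fun x => x) false := by
  unfold solution_alt
  simp only [pv_dicB_eq]
  apply congrArg (fun l => PySem.List.sorted l (fun x => x) false)
  have hbody : ∀ (acc : List String), ∀ i ∈ PySem.List.pyRange 2 11 1,
      (match PySem.List.max? (PySem.Dict.counter (pvSeqB o c i)).values (fun v => v) with
       | none => acc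
       | some best =>
          if 2 ≤ best then
            acc ++ ((PySem.Dict.counter (pvSeqB o c i)).items.filter (fun p => p.2 == best)).map (fun p => p.1)
          else acc)
      = acc ++ pvGB o c i := by
    intro acc i _
    rw [pvGB]
    cases PySem.List.max? (PySem.Dict.counter (pvSeqB o c i)).values (fun v => v) with
    | none => dsimp only; rw [List.append_nil]
    | some best =>
      dsimp only
      by_cases hb : 2 ≤ best
      · rw [if_pos hb, if_pos hb]
      · rw [if_neg hb, if_neg hb, List.append_nil]
  rw [PySem.List.foldl_congr_mem _ _ _ _ hbody, PySem.List.foldl_append_eq_flatMap, List.nil_append]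

theorem pv_valuesB (o : List String) (c : List Int) (i : Int) :
    (PySem.Dict.counter (pvSeqB o c i)).values
      = (PySem.Set.ofList (pvSeqB o c i)).map (fun k => ((pvSeqB o c i).count k : Int)) := by
  rw [PySem.Dict.values_eq_map_keys _ (PySem.Dict.nodup_keys_counter _) 0, PySem.Dict.keys_counter]
  apply List.map_congr_left
  intro k _
  exact PySem.Dict.getD_counter _ _

theorem pv_countB_eq_countA (o : List String) (c : List Int) (hpre : Pre_solution o c)
    (i : Int) (hi2 : 2 ≤ i) (hi10 : i ≤ 10) (k : String) (hlen : k.toList.length = i.toNat) :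
    (pvSeqB o c i).count k = (pvSeqA o c).count k := by
  apply pv_count_eq o c hpre i hi2 hi10 k
  rw [hlen, Int.toNat_of_nonneg (by omega)]

-- B's best for length i equals A's cnt[i], whenever it is ≥ 2
theorem pv_best_eq (o : List String) (c : List Int) (hpre : Pre_solution o c)
    (i : Int) (hi2 : 2 ≤ i) (hi10 : i ≤ 10) (best : Int)
    (hb : PySem.List.max? (PySem.Dict.counter (pvSeqB o c i)).values (fun v => v) = some best)
    (h2 : 2 ≤ best) : best = pvM o c i.toNat := by
  have hmem := PySem.List.max?_mem hb
  rw [pv_valuesB, List.mem_map] at hmem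
  obtain ⟨kb, hkb, hkbv⟩ := hmem
  rw [PySem.Set.mem_ofList] at hkb
  have hkblen : kb.toList.length = i.toNat := pv_mem_seqB_length o c i kb hkb
  have hkbc : (pvSeqB o c i).count kb = (pvSeqA o c).count kb :=
    pv_countB_eq_countA o c hpre i hi2 hi10 kb hkblen
  have hkbA2 : 2 ≤ (pvSeqA o c).count kb := by rw [← hkbc]; omega
  have hkbK2 : kb ∈ pvKeys2 o c := by
    rw [pv_mem_keys2]
    exact ⟨List.count_pos_iff.1 (by omega), hkbA2⟩
  have hle : best ≤ pvM o c i.toNat := by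
    rw [← hkbv, hkbc]
    exact pvM_le o c i.toNat kb hkbK2 hkblen
  have hge : pvM o c i.toNat ≤ best := by
    rcases pvM_attain o c i.toNat with h0 | ⟨km, hkm2, hkmlen, hkmv⟩
    · omega
    · have hkmA2 : 2 ≤ (pvSeqA o c).count km := ((pv_mem_keys2 o c km).1 hkm2).2
      have hkmc : (pvSeqB o c i).count km = (pvSeqA o c).count km :=
        pv_countB_eq_countA o c hpre i hi2 hi10 km hkmlen
      have hkmB : km ∈ pvSeqB o c i := List.count_pos_iff.1 (by omega)
      have hv : ((pvSeqB o c i).count km : Int) ∈ (PySem.Dict.counter (pvSeqB o c i)).values := by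
        rw [pv_valuesB, List.mem_map]
        exact ⟨km, (PySem.Set.mem_ofList _ _).2 hkmB, rfl⟩
      have := PySem.List.max?_isMax hb _ hv
      simp only at this
      rw [← hkmv, ← hkmc]
      exact this
  omega

theorem pv_mem_GA (o : List String) (c : List Int) (_hpre : Pre_solution o c) (k : String) :
    (k ∈ (PySem.List.pyRange 2 11 1).flatMap (pvGA o c))
      ↔ (k ∈ pvKeys2 o c ∧ 2 ≤ k.toList.length ∧ k.toList.length ≤ 10 ∧
          ((pvSeqA o c).count k : Int) = pvM o c (k.toList.length)) := by
  rw [List.mem_flatMap]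
  constructor
  · rintro ⟨i, hir, hkg⟩
    rw [PySem.List.mem_pyRange_one] at hir
    rw [pvGA] at hkg
    by_cases hz : pvM o c i.toNat = 0
    · rw [if_pos hz] at hkg; cases hkg
    · rw [if_neg hz, List.mem_filter] at hkg
      obtain ⟨hk2, hdec⟩ := hkg
      rw [decide_eq_true_iff] at hdec
      obtain ⟨hilen, hcnt⟩ := hdec
      have hlen : i.toNat = k.toList.length := by omega
      rw [hlen] at hcnt
      exact ⟨hk2, by omega, by omega, hcnt.symm⟩
  · rintro ⟨hk2, hl2, hl10, hcA⟩
    refine ⟨(k.toList.length : Int), ?_, ?_⟩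
    · rw [PySem.List.mem_pyRange_one]; omega
    · have hA2 : 2 ≤ (pvSeqA o c).count k := ((pv_mem_keys2 o c k).1 hk2).2
      rw [pvGA, Int.toNat_natCast]
      rw [if_neg (by omega)]
      rw [List.mem_filter, decide_eq_true_iff]
      exact ⟨hk2, rfl, hcA.symm⟩

theorem pv_mem_GB_iff (o : List String) (c : List Int) (i : Int) (k : String) :
    k ∈ pvGB o c i ↔ ∃ best, PySem.List.max? (PySem.Dict.counter (pvSeqB o c i)).values (fun v => v) = some best ∧
      2 ≤ best ∧ k ∈ pvSeqB o c i ∧ ((pvSeqB o c i).count k : Int) = best := by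
  rw [pvGB]
  cases hm : PySem.List.max? (PySem.Dict.counter (pvSeqB o c i)).values (fun v => v) with
  | none => simp
  | some best =>
    dsimp only
    by_cases hb : 2 ≤ best
    · rw [if_pos hb]
      simp only [List.mem_map, List.mem_filter, PySem.Dict.items_counter, PySem.Set.mem_ofList]
      constructor
      · rintro ⟨p, ⟨⟨k', hk', rfl⟩, hpv⟩, rfl⟩
        rw [beq_iff_eq] at hpv
        exact ⟨best, rfl, hb, hk', hpv⟩
      · rintro ⟨best', hbest', h2', hkmem, hkv⟩
        rw [Option.some_inj] at hbest'
        subst hbest'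
        exact ⟨(k, ((pvSeqB o c i).count k : Int)), ⟨⟨k, hkmem, rfl⟩, by simpa using hkv⟩, rfl⟩
    · rw [if_neg hb]
      simp only [List.not_mem_nil, false_iff]
      rintro ⟨best', hbest', h2', -, -⟩
      rw [Option.some_inj] at hbest'
      omega

theorem pv_mem_GB (o : List String) (c : List Int) (hpre : Pre_solution o c) (k : String) :
    (k ∈ (PySem.List.pyRange 2 11 1).flatMap (pvGB o c))
      ↔ (k ∈ pvKeys2 o c ∧ 2 ≤ k.toList.length ∧ k.toList.length ≤ 10 ∧
          ((pvSeqA o c).count k : Int) = pvM o c (k.toList.length)) := by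
  rw [List.mem_flatMap]
  constructor
  · rintro ⟨i, hir, hkg⟩
    rw [PySem.List.mem_pyRange_one] at hir
    rw [pv_mem_GB_iff] at hkg
    obtain ⟨best, hm, h2, hkmem, hkv⟩ := hkg
    have hlen : k.toList.length = i.toNat := pv_mem_seqB_length o c i k hkmem
    have hcB : (pvSeqB o c i).count k = (pvSeqA o c).count k :=
      pv_countB_eq_countA o c hpre i (by omega) (by omega) k hlen
    have hbest : best = pvM o c i.toNat := pv_best_eq o c hpre i (by omega) (by omega) best hm h2
    have hA2 : 2 ≤ (pvSeqA o c).count k := by rw [← hcB]; omega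
    refine ⟨(pv_mem_keys2 o c k).2 ⟨List.count_pos_iff.1 (by omega), hA2⟩, by omega, by omega, ?_⟩
    rw [hlen, ← hbest, ← hcB]
    exact hkv
  · rintro ⟨hk2, hl2, hl10, hcA⟩
    have hA2 : 2 ≤ (pvSeqA o c).count k := ((pv_mem_keys2 o c k).1 hk2).2
    refine ⟨(k.toList.length : Int), ?_, ?_⟩
    · rw [PySem.List.mem_pyRange_one]; omega
    · rw [pv_mem_GB_iff]
      have hlen : k.toList.length = ((k.toList.length : Int)).toNat := by omega
      have hcB : (pvSeqB o c (k.toList.length : Int)).count k = (pvSeqA o c).count k :=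
        pv_countB_eq_countA o c hpre _ (by omega) (by omega) k hlen.symm
      have hkmem : k ∈ pvSeqB o c (k.toList.length : Int) := List.count_pos_iff.1 (by omega)
      have hv : ((pvSeqB o c (k.toList.length : Int)).count k : Int)
          ∈ (PySem.Dict.counter (pvSeqB o c (k.toList.length : Int))).values := by
        rw [pv_valuesB, List.mem_map]
        exact ⟨k, (PySem.Set.mem_ofList _ _).2 hkmem, rfl⟩
      cases hm : PySem.List.max? (PySem.Dict.counter (pvSeqB o c (k.toList.length : Int))).values (fun v => v) with
      | none =>
        rw [PySem.List.max?_eq_none_iff] at hm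
        rw [hm] at hv
        cases hv
      | some best =>
        have hle := PySem.List.max?_isMax hm _ hv
        simp only at hle
        have h2 : 2 ≤ best := by omega
        have hbest : best = pvM o c ((k.toList.length : Int)).toNat :=
          pv_best_eq o c hpre _ (by omega) (by omega) best hm h2
        refine ⟨best, rfl, h2, hkmem, ?_⟩
        rw [hcB, hbest, ← hlen]
        exact hcA

theorem pv_mem_GA_len (o : List String) (c : List Int) (i : Int) (k : String)
    (hk : k ∈ pvGA o c i) : i = (k.toList.length : Int) := by
  rw [pvGA] at hk
  by_cases hz : pvM o c i.toNat = 0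
  · rw [if_pos hz] at hk; cases hk
  · rw [if_neg hz, List.mem_filter, decide_eq_true_iff] at hk
    exact hk.2.1

theorem pv_nodup_GA (o : List String) (c : List Int) :
    ((PySem.List.pyRange 2 11 1).flatMap (pvGA o c)).Nodup := by
  rw [List.nodup_flatMap]
  constructor
  · intro i _
    rw [pvGA]
    by_cases hz : pvM o c i.toNat = 0
    · rw [if_pos hz]; exact List.nodup_nil
    · rw [if_neg hz]; exact (pv_nodup_keys2 o c).filter _
  · apply (PySem.List.nodup_pyRange_one 2 11).imp_of_mem
    intro i j _ _ hne k hki hkj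
    apply hne
    rw [pv_mem_GA_len o c i k hki, pv_mem_GA_len o c j k hkj]

theorem pv_mem_GB_len (o : List String) (c : List Int) (i : Int) (k : String)
    (hk : k ∈ pvGB o c i) : k.toList.length = i.toNat := by
  rw [pv_mem_GB_iff] at hk
  obtain ⟨best, -, -, hkmem, -⟩ := hk
  exact pv_mem_seqB_length o c i k hkmem

theorem pv_nodup_GB (o : List String) (c : List Int) :
    ((PySem.List.pyRange 2 11 1).flatMap (pvGB o c)).Nodup := by
  rw [List.nodup_flatMap]
  constructor
  · intro i _
    rw [pvGB]
    cases PySem.List.max? (PySem.Dict.counter (pvSeqB o c i)).values (fun v => v) with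
    | none => exact List.nodup_nil
    | some best =>
      dsimp only
      by_cases hb : 2 ≤ best
      · rw [if_pos hb]
        rw [PySem.Dict.items_counter, List.filter_map, List.map_map]
        simp only [Function.comp_def]
        exact List.Nodup.map (fun a b h => h) ((PySem.Set.nodup_ofList _).filter _)
      · rw [if_neg hb]; exact List.nodup_nil
  · have hpw := (PySem.List.nodup_pyRange_one 2 11)
    have hmem : ∀ x ∈ PySem.List.pyRange 2 11 1, (2:Int) ≤ x := by
      intro x hx; rw [PySem.List.mem_pyRange_one] at hx; omega
    apply hpw.imp_of_mem
    intro i j hi hj hne k hki hkj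
    apply hne
    have h1 := pv_mem_GB_len o c i k hki
    have h2 := pv_mem_GB_len o c j k hkj
    have := hmem i hi
    have := hmem j hj
    omega


-- ===== VERDICT (by name: the statement is the Claim_ definition above) =====
theorem solution_spec : Claim_equal_solution := by
  intro o c _hdom hpre
  unfold Spec_solution
  rw [pv_solution_eq o c hpre, pv_solution_alt_eq o c]
  apply PySem.List.sorted_eq_sorted_of_perm _ _ _ (fun a b h => h)
  rw [List.perm_ext_iff_of_nodup (pv_nodup_GA o c) (pv_nodup_GB o c)]
  intro k
  rw [pv_mem_GA o c hpre k, pv_mem_GB o c hpre k]
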